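-- pv_equiv track=rewrite | github.com/larynx95/rosalind | src/ba03/ba03i_k_universal/ba03i.py | prod_recur
-- ===== SOURCE A (Python) =====
-- def prod_recur(text, k):
--     """
--     (str,int) -> gen
--     >>> list(prod_recur("ACG",2))
--         ['AA','AC','AG','CA','CC','CG','GA','GC','GG']
--     """
--     if k == 1:
--         for ch in text:
--             yield ch
--     else:
--         for ch in text:
--             for s in prod_recur(text, k - 1):
--                 yield ch + s
-- ===== SOURCE B (Python) =====
-- def prod_recur(text, k):
--     # Iterative: grow the list of partial strings over k rounds (prefix outer, char inner).
--     acc = ['']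
--     for _ in range(k):
--         acc = [p + ch for p in acc for ch in text]
--     yield from acc
-- ===== Notes on version B (the rewrite author's own statement) =====
-- stated objective: alternative
-- what changed: Replaces the per-character recursion (one generator frame per remaining position) with a single accumulator list grown over k rounds of a product comprehension.
-- outside the precondition, e.g. on prod_recur('', 0): A returns [], B returns ['']; on prod_recur('', -1): A returns [], B returns ['']
import Mathlib
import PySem

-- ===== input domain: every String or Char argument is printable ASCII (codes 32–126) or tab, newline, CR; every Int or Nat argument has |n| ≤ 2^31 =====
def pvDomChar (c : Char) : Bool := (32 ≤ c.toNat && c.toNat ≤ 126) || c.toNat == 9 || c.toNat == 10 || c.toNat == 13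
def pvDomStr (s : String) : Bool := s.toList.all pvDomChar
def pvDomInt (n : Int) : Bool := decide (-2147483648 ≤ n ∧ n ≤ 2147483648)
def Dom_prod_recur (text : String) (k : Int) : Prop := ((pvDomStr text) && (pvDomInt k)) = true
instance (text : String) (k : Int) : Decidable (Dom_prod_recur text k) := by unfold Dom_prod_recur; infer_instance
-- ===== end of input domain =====

-- B replaces A's per-character recursion with a single accumulator grown over k rounds (alternative decomposition, same cost).


-- ===== PORT A =====
-- Literal port of the recursive generator, collected as a list.
-- The 'k ≤ 0' guard only makes the recursion total: Python diverges there for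
-- nonempty text (RecursionError) and yields nothing for empty text; both outside Pre_.
def prod_recur (text : String) (k : Int) : List String :=
  if k ≤ 0 then []
  else if k = 1 then text.toList.map (fun ch => String.ofList [ch])
  else text.toList.flatMap (fun ch =>
    (prod_recur text (k - 1)).map (fun s => String.ofList ([ch] ++ s.toList)))
termination_by k.toNat
decreasing_by omega

-- ===== PORT B =====
-- Port of Source B: acc = ['']; k rounds of acc = [p + ch for p in acc for ch in text].
def prod_recur_alt (text : String) (k : Int) : List String :=
  (List.range k.toNat).foldl
    (fun acc _ => acc.flatMap (fun p => text.toList.map (fun ch => p ++ String.ofList [ch])))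
    [""]

-- ===== PRECONDITION & SPEC =====
-- Pre_ excludes k ≤ 0: there Python A raises RecursionError for nonempty text, and for
-- empty text A's value [] is an accident of the recursion (B returns the k = 0 product ['']).
def Pre_prod_recur (text : String) (k : Int) : Prop := 1 ≤ k
instance (text : String) (k : Int) : Decidable (Pre_prod_recur text k) := by unfold Pre_prod_recur; infer_instance
def pvWitness_prod_recur : String × Int := ("AC", 2)

def Spec_prod_recur (text : String) (k : Int) (out : List String) : Prop := out = prod_recur_alt text k
instance (text : String) (k : Int) (out : List String) : Decidable (Spec_prod_recur text k out) := by unfold Spec_prod_recur; infer_instance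

-- ===== CLAIM (what is proved, stated in full; the proofs are below) =====
def Claim_equal_prod_recur : Prop := ∀ (text : String) (k : Int), Dom_prod_recur text k → Pre_prod_recur text k → Spec_prod_recur text k (prod_recur text k)

-- ===== LEMMAS AND PROOFS =====

-- words of length n over L, first character slowest (A's enumeration order)
def pvW (L : List Char) : Nat → List (List Char)
  | 0 => [[]]
  | n + 1 => L.flatMap (fun c => (pvW L n).map (c :: ·))

theorem flatMap_sing {a b : Type} (f : a → b) (l : List a) :
    l.flatMap (fun x => [f x]) = l.map f := by
  induction l <;> simp_all

-- A computes the words of length k (k ≥ 1), as strings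
theorem prod_recur_eq_pvW (text : String) (n : Nat) :
    prod_recur text ((n : Int) + 1) = (pvW text.toList (n + 1)).map (fun l => String.ofList l) := by
  induction n with
  | zero =>
    rw [prod_recur]
    simp [pvW, flatMap_sing, List.map_map, Function.comp_def]
  | succ m ih =>
    rw [prod_recur]
    have h0 : ¬ (((m + 1 : Nat) : Int) + 1 ≤ 0) := by push_cast; omega
    have h1 : ¬ (((m + 1 : Nat) : Int) + 1 = 1) := by push_cast; omega
    have h2 : ((m + 1 : Nat) : Int) + 1 - 1 = (m : Int) + 1 := by push_cast; ring
    rw [if_neg h0, if_neg h1, h2, ih]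
    simp only [show pvW text.toList (m + 1 + 1)
        = text.toList.flatMap (fun c => (pvW text.toList (m + 1)).map (c :: ·)) from rfl]
    simp [List.map_flatMap, List.map_map, Function.comp_def]

-- the prepend recursion pvW also satisfies the append-at-the-end recursion (B's step)
theorem pvW_snoc (L : List Char) (n : Nat) :
    (pvW L n).flatMap (fun l => L.map (fun c => l ++ [c]))
      = L.flatMap (fun c => (pvW L n).map (c :: ·)) := by
  induction n with
  | zero => simp [pvW, flatMap_sing]
  | succ m ih =>
    simp only [pvW, List.flatMap_assoc, List.flatMap_map]
    refine List.flatMap_congr ?_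
    intro c _
    have h := congrArg (fun t => t.map (c :: ·)) ih
    simp only [List.map_flatMap, List.map_map, Function.comp_def] at h
    simpa [List.map_flatMap, List.map_map, Function.comp_def, List.cons_append] using h

-- B's accumulator after n rounds is the words of length n
theorem alt_fold_eq_pvW (text : String) (n : Nat) :
    (List.range n).foldl
      (fun acc _ => acc.flatMap (fun p => text.toList.map (fun ch => p ++ String.ofList [ch])))
      [""]
      = (pvW text.toList n).map (fun l => String.ofList l) := by
  induction n with
  | zero =>
    simp only [List.range_zero, List.foldl_nil, pvW, List.map]
  | succ m ih =>
    rw [List.range_succ, List.foldl_append, List.foldl_cons, List.foldl_nil, ih]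
    rw [show pvW text.toList (m + 1)
          = text.toList.flatMap (fun c => (pvW text.toList m).map (c :: ·)) from rfl]
    rw [← pvW_snoc]
    simp [List.flatMap_map, List.map_flatMap, Function.comp_def, String.ofList_append]

-- ===== VERDICT (by name: the statement is the Claim_ definition above) =====
theorem prod_recur_spec : Claim_equal_prod_recur := by
  intro text k _ hpre
  unfold Spec_prod_recur Pre_prod_recur at *
  obtain ⟨n, hn⟩ : ∃ n : Nat, k = (n : Int) + 1 := ⟨(k - 1).toNat, by omega⟩
  subst hn
  have htn : ((n : Int) + 1).toNat = n + 1 := by omega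
  rw [prod_recur_eq_pvW, prod_recur_alt, htn, alt_fold_eq_pvW]
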